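-- pv_equiv track=rewrite | github.com/AndrewShepherd/leetcode-python | number-of-effective-subsequences/number_of_effective_subsequences.py | countEffective
-- ===== SOURCE A (Python) =====
-- from collections import defaultdict
--
-- MODULO = 10**9 + 7
--
-- def get_all_combinations(combination_length, not_exceeding):
--     if combination_length <= not_exceeding:
--         if (combination_length == 1):
--             for i in range(0, not_exceeding):
--                 yield [i]
--         else:
--             for sub_array in get_all_combinations(combination_length - 1, not_exceeding - 1):
--                 yield sub_array + [not_exceeding - 1]
--             for sub_array in get_all_combinations(combination_length, not_exceeding - 1):
--                 yield sub_array
--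
-- def countEffective(nums: list[int]) -> int:
--     d = defaultdict(set)
--     for i,n in enumerate(nums):
--         f = 1
--         while(n):
--             if n & f:
--                 d[f].add(i)
--                 n -= f
--             f <<= 1
--
--     result = 0
--
--     keys = list(d.keys())
--
--     for i,k in enumerate(keys):
--         result = result + pow(2, len(nums) - len(d[k]), MODULO)
--         for j in range(1, i+1):
--             union_lengths = []
--             for combination in get_all_combinations(j, i):
--                 u = d[k]
--                 for entry in combination:
--                     entry_key = keys[entry]
--                     u = u.union(d[entry_key])
--                 union_lengths.append(len(u))
--             deltas = [pow(2, len(nums) - u, MODULO) for u in union_lengths]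
--             delta_sum = sum(deltas) % MODULO
--             if j % 2:
--                 result = (result - delta_sum) % MODULO
--             else:
--                 result = (result + delta_sum) % MODULO
--
--     return result
-- ===== SOURCE B (Python) =====
-- MODULO = 10**9 + 7
--
-- def countEffective(nums: list[int]) -> int:
--     # One inclusion-exclusion pass: a single loop over all nonempty bitmasks of
--     # key-groups replaces A's nested per-key / per-size / recursive-combination
--     # enumeration.
--     d = {}
--     for i, x in enumerate(nums):
--         b = 0
--         while x >> b:
--             if (x >> b) & 1:
--                 d.setdefault(1 << b, set()).add(i)
--             b += 1
--     vals = list(d.values())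
--     k = len(vals)
--     total = 0
--     for m in range(1, 1 << k):
--         u = set()
--         c = 0
--         for t in range(k):
--             if (m >> t) & 1:
--                 u |= vals[t]
--                 c += 1
--         p = pow(2, len(nums) - len(u), MODULO)
--         total = (total + p if c % 2 else total - p) % MODULO
--     return total
-- ===== Notes on version B (the rewrite author's own statement) =====
-- stated objective: simpler
-- what changed: Replaces A's nested enumeration (per key index, per subset size, recursively generated combinations of earlier keys, with intermediate union-length lists) by a single flat loop over all nonempty bitmasks of the key groups, adding one signed inclusion-exclusion term per mask; the recursive combination generator disappears. Pre_ excludes lists containing a negative number, on which A's bit-extraction while-loop never terminates.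
import Mathlib
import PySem

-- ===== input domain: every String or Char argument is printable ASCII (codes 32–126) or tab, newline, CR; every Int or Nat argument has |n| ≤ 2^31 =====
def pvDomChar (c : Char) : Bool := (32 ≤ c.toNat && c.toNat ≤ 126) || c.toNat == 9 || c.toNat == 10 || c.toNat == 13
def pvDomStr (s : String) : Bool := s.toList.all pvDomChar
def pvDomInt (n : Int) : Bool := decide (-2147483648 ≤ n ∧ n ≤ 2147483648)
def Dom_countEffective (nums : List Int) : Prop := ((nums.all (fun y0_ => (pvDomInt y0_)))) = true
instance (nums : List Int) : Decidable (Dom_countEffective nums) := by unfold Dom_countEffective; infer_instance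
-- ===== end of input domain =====

-- B replaces A's nested per-key/per-size/recursive-combination enumeration by one flat
-- loop over nonempty bitmasks of the key groups (objective: simpler); equal return values on Pre_.

-- ===== PORT A =====
def pvMod : Int := 1000000007

-- the 'while(n)' bit-extraction loop of A (fuel only makes it total; Python diverges for n < 0)
def pvBitLoopA (fuel : Nat) (n f i : Int) (d : PySem.Dict Int (PySem.Set Int)) :
    PySem.Dict Int (PySem.Set Int) :=
  match fuel with
  | 0 => d
  | fuel+1 =>
    if n = 0 then d
    else if PySem.Int.band n f ≠ 0 then
      pvBitLoopA fuel (n - f) (f <<< (1:Nat)) i (d.insert f ((d.getD f PySem.Set.empty).add i))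
    else pvBitLoopA fuel n (f <<< (1:Nat)) i d

-- get_all_combinations (fuel only makes the recursion total; ne decreases by 1 each call)
def pvGac (fuel : Nat) (l ne : Int) : List (List Int) :=
  match fuel with
  | 0 => []
  | fuel+1 =>
    if l ≤ ne then
      if l = 1 then (PySem.List.pyRange 0 ne 1).map (fun i => [i])
      else ((pvGac fuel (l-1) (ne-1)).map (fun c => c ++ [ne-1])) ++ pvGac fuel l (ne-1)
    else []

def countEffective (nums : List Int) : Int :=
  let d := (PySem.List.enumerate nums 0).foldl
      (fun d p => pvBitLoopA (p.2.toNat + 1) p.2 1 p.1 d) PySem.Dict.empty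
  let keys := d.keys
  (PySem.List.enumerate keys 0).foldl (fun result p =>
    let i := p.1
    let k := p.2
    let result := result +
      PySem.Int.powMod 2 (PySem.List.len nums - (d.getD k PySem.Set.empty).len).toNat pvMod
    (PySem.List.pyRange 1 (i+1) 1).foldl (fun result j =>
      let unionLengths := (pvGac (i.toNat + 1) j i).foldl (fun ul c =>
        let u := c.foldl (fun u entry =>
          let entryKey := PySem.List.pyGetD keys entry 0
          u.union (d.getD entryKey PySem.Set.empty)) (d.getD k PySem.Set.empty)
        ul ++ [PySem.Set.len u]) ([] : List Int)
      let deltas := unionLengths.map (fun u =>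
        PySem.Int.powMod 2 (PySem.List.len nums - u).toNat pvMod)
      let deltaSum := PySem.Int.mod deltas.sum pvMod
      if PySem.Int.mod j 2 ≠ 0 then PySem.Int.mod (result - deltaSum) pvMod
      else PySem.Int.mod (result + deltaSum) pvMod) result) 0

-- ===== PORT B =====
-- the 'while x >> b' bit-extraction loop of B (fuel only makes it total)
def pvBitLoopB (fuel : Nat) (x : Int) (b : Nat) (i : Int) (d : PySem.Dict Int (PySem.Set Int)) :
    PySem.Dict Int (PySem.Set Int) :=
  match fuel with
  | 0 => d
  | fuel+1 =>
    if x >>> b = 0 then d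
    else
      let d := if PySem.Int.band (x >>> b) 1 ≠ 0 then
          let d := d.setdefault ((1:Int) <<< b) PySem.Set.empty
          d.insert ((1:Int) <<< b) ((d.getD ((1:Int) <<< b) PySem.Set.empty).add i)
        else d
      pvBitLoopB fuel x (b+1) i d

def countEffective_alt (nums : List Int) : Int :=
  let d := (PySem.List.enumerate nums 0).foldl
      (fun d p => pvBitLoopB (p.2.toNat + 1) p.2 0 p.1 d) PySem.Dict.empty
  let vals := d.values
  let k := PySem.List.len vals
  (PySem.List.pyRange 1 ((1:Int) <<< k.toNat) 1).foldl (fun total m =>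
    let uc := (PySem.List.pyRange 0 k 1).foldl (fun (uc : PySem.Set Int × Int) t =>
      if PySem.Int.band (m >>> t.toNat) 1 ≠ 0 then
        ((uc.1).union (PySem.List.pyGetD vals t PySem.Set.empty), uc.2 + 1)
      else uc) (PySem.Set.empty, 0)
    let p := PySem.Int.powMod 2 (PySem.List.len nums - (uc.1).len).toNat pvMod
    PySem.Int.mod (if PySem.Int.mod uc.2 2 ≠ 0 then total + p else total - p) pvMod) 0

-- ===== PRECONDITION & SPEC =====
-- Pre_ excludes lists containing a negative number: there A's while(n) loop never terminates
-- (Python diverges, no value is returned), and B's while loop diverges likewise.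
def Pre_countEffective (nums : List Int) : Prop := ∀ x ∈ nums, 0 ≤ x
instance (nums : List Int) : Decidable (Pre_countEffective nums) := by
  unfold Pre_countEffective; infer_instance

def pvWitness_countEffective : List Int := [3, 1, 6]

def Spec_countEffective (nums : List Int) (out : Int) : Prop := out = countEffective_alt nums
instance (nums : List Int) (out : Int) : Decidable (Spec_countEffective nums out) := by
  unfold Spec_countEffective; infer_instance

-- ===== CLAIM (what is proved, stated in full; the proofs are below) =====
def Claim_equal_countEffective : Prop :=
  ∀ (nums : List Int), Dom_countEffective nums → Pre_countEffective nums →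
    Spec_countEffective nums (countEffective nums)

-- ===== LEMMAS AND PROOFS =====

def pvTouch (d : PySem.Dict Int (PySem.Set Int)) (k i : Int) : PySem.Dict Int (PySem.Set Int) :=
  d.insert k ((d.getD k PySem.Set.empty).add i)

def pvTraceA (fuel : Nat) (n f : Int) : List Int :=
  match fuel with
  | 0 => []
  | fuel+1 => if n = 0 then [] else if PySem.Int.band n f ≠ 0 then
      f :: pvTraceA fuel (n-f) (f <<< (1:Nat)) else pvTraceA fuel n (f <<< (1:Nat))

def pvTraceB (fuel : Nat) (x : Int) (b : Nat) : List Int :=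
  match fuel with
  | 0 => []
  | fuel+1 => if x >>> b = 0 then [] else
      (if PySem.Int.band (x >>> b) 1 ≠ 0 then [(1:Int) <<< b] else []) ++ pvTraceB fuel x (b+1)

theorem loopA_eq_fold (fuel : Nat) : ∀ (n f i : Int) (d : PySem.Dict Int (PySem.Set Int)),
    pvBitLoopA fuel n f i d = (pvTraceA fuel n f).foldl (fun d k => pvTouch d k i) d := by
  induction fuel with
  | zero => intro n f i d; rfl
  | succ fuel ih =>
    intro n f i d
    rw [pvBitLoopA, pvTraceA]
    split
    · rfl
    · split
      · rw [ih]; rfl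
      · rw [ih]

theorem insert_insert_of_not_contains (d : PySem.Dict Int (PySem.Set Int)) (b : Int)
    (v w : PySem.Set Int) (h : d.contains b = false) :
    (d.insert b v).insert b w = d.insert b w := by
  have hfind : ∀ p ∈ d.items, (p.1 == b) = false := by
    intro p hp
    by_contra hne
    have : d.contains b = true := by
      unfold PySem.Dict.contains
      exact List.any_eq_true.mpr ⟨p, hp, by simpa using hne⟩
    simp [this] at h
  have h1 : d.insert b v = ⟨d.items ++ [(b, v)]⟩ := by
    unfold PySem.Dict.insert; simp [h]
  have h2 : (⟨d.items ++ [(b, v)]⟩ : PySem.Dict Int (PySem.Set Int)).contains b = true := by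
    unfold PySem.Dict.contains; simp
  have h3 : d.insert b w = ⟨d.items ++ [(b, w)]⟩ := by
    unfold PySem.Dict.insert; simp [h]
  rw [h1, h3]
  unfold PySem.Dict.insert
  rw [if_pos h2]
  congr 1
  simp only [List.map_append, List.map_cons, List.map_nil, BEq.rfl, if_true]
  congr 1
  exact (List.map_congr_left (fun p hp => by simp [hfind p hp])).trans (List.map_id _)

theorem touchB_eq (d : PySem.Dict Int (PySem.Set Int)) (b i : Int) :
    (d.setdefault b PySem.Set.empty).insert b
      (((d.setdefault b PySem.Set.empty).getD b PySem.Set.empty).add i) = pvTouch d b i := by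
  by_cases h : d.contains b = true
  · rw [PySem.Dict.setdefault_of_contains _ _ h]; rfl
  · have h' : d.contains b = false := by simpa using h
    rw [PySem.Dict.setdefault_of_not_contains _ _ h']
    rw [PySem.Dict.getD, PySem.Dict.get?_insert_self]
    have hg : d.get? b = none := by
      rw [PySem.Dict.get?_eq_none_iff_not_mem_keys]
      intro hm
      rw [PySem.Dict.contains_eq_decide_mem_keys] at h'
      simp at h'
      exact h' hm
    unfold pvTouch PySem.Dict.getD
    rw [hg]
    exact insert_insert_of_not_contains d b _ _ h'

theorem loopB_eq_fold (fuel : Nat) : ∀ (x : Int) (b : Nat) (i : Int) (d : PySem.Dict Int (PySem.Set Int)),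
    pvBitLoopB fuel x b i d = (pvTraceB fuel x b).foldl (fun d k => pvTouch d k i) d := by
  induction fuel with
  | zero => intro x b i d; rfl
  | succ fuel ih =>
    intro x b i d
    rw [pvBitLoopB, pvTraceB]
    split
    · rfl
    · split
      · rw [ih, List.foldl_append]
        simp only [List.foldl_cons, List.foldl_nil]
        rw [touchB_eq]
      · rw [ih]; rfl

theorem intCast_shiftRight (m k : Nat) : ((m:Int)) >>> k = ((m >>> k : Nat) : Int) := rfl

theorem intCast_shiftLeft (a s : Nat) : ((a:Nat):Int) <<< s = ((a <<< s : Nat):Int) := rfl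

theorem one_shiftLeft_int (b : Nat) : (1:Int) <<< b = ((2^b : Nat) : Int) := by
  have := intCast_shiftLeft 1 b
  simpa [Nat.shiftLeft_eq] using this

theorem trace_corr (fuel : Nat) : ∀ (m k : Nat),
    pvTraceA fuel (((m >>> k) * 2^k : Nat) : Int) ((2^k : Nat):Int) = pvTraceB fuel (m:Int) k := by
  induction fuel with
  | zero => intro m k; rfl
  | succ fuel ih =>
    intro m k
    rw [pvTraceA, pvTraceB]
    have hpow : (0:Nat) < 2^k := Nat.two_pow_pos k
    have hsh : (m:Int) >>> k = ((m >>> k : Nat) : Int) := intCast_shiftRight m k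
    have hguard : ((((m >>> k) * 2^k : Nat) : Int) = 0) ↔ ((m:Int) >>> k = 0) := by
      rw [hsh]
      constructor
      · intro h
        have h0 : (m >>> k) * 2^k = 0 := by exact_mod_cast h
        rcases Nat.mul_eq_zero.mp h0 with h1 | h2
        · simp [h1]
        · omega
      · intro h
        have : m >>> k = 0 := by exact_mod_cast h
        simp [this]
    have hbit : (m >>> k) &&& 1 = ((m >>> k).testBit 0).toNat := by
      rw [Nat.and_one_is_mod, Nat.testBit_zero]
      rcases Nat.mod_two_eq_zero_or_one (m >>> k) with h | h <;> simp [h]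
    have hband : (PySem.Int.band (((m >>> k) * 2^k : Nat) : Int) ((2^k:Nat):Int) ≠ 0)
        ↔ (PySem.Int.band ((m:Int) >>> k) 1 ≠ 0) := by
      rw [hsh]
      have hc1 : ((1:Nat):Int) = (1:Int) := by norm_cast
      rw [← hc1, PySem.Int.band_natCast, PySem.Int.band_natCast]
      have h1 : ((m >>> k) * 2^k) &&& 2^k = ((m >>> k).testBit 0).toNat * 2^k := by
        rw [Nat.and_two_pow ((m >>> k) * 2^k) k]
        congr 2
        rw [← Nat.shiftLeft_eq]
        simp [Nat.testBit_shiftLeft]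
      rw [h1, hbit]
      cases hb : (m >>> k).testBit 0 <;> simp
    by_cases hz : (m:Int) >>> k = 0
    · rw [if_pos (hguard.mpr hz), if_pos hz]
    · rw [if_neg (fun h => hz (hguard.mp h)), if_neg hz]
      have hshift2 : ((2^k : Nat):Int) <<< (1:Nat) = ((2^(k+1) : Nat):Int) := by
        rw [intCast_shiftLeft]
        congr 1
        rw [Nat.shiftLeft_eq]
        ring
      by_cases hb : PySem.Int.band ((m:Int) >>> k) 1 ≠ 0
      · rw [if_pos (hband.mpr hb), if_pos hb]
        have hodd : (m >>> k) % 2 = 1 := by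
          have := hband.mpr hb
          rw [hsh] at hb
          have hc1 : ((1:Nat):Int) = (1:Int) := by norm_cast
          rw [← hc1, PySem.Int.band_natCast] at hb
          rw [Nat.and_one_is_mod] at hb
          omega
        have hsub : (((m >>> k) * 2^k : Nat) : Int) - ((2^k:Nat):Int)
            = (((m >>> (k+1)) * 2^(k+1) : Nat) : Int) := by
          have hdiv : m >>> (k+1) = (m >>> k) / 2 := Nat.shiftRight_succ m k
          have : (m >>> k) * 2^k = (m >>> (k+1)) * 2^(k+1) + 2^k := by
            rw [hdiv, pow_succ]
            have : m >>> k = 2 * ((m >>> k) / 2) + 1 := by omega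
            calc (m >>> k) * 2^k = (2 * ((m >>> k) / 2) + 1) * 2^k := by rw [← this]
            _ = (m >>> k) / 2 * (2^k * 2) + 2^k := by ring
          rw [this]
          push_cast
          ring
        rw [hsub, hshift2, ih]
        congr 1
        rw [one_shiftLeft_int]
      · rw [if_neg (fun h => hb (hband.mp h)), if_neg hb]
        have heven : (m >>> k) % 2 = 0 := by
          rw [hsh] at hb
          have hc1 : ((1:Nat):Int) = (1:Int) := by norm_cast
          rw [← hc1, PySem.Int.band_natCast, Nat.and_one_is_mod] at hb
          omega
        have heq : (m >>> k) * 2^k = (m >>> (k+1)) * 2^(k+1) := by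
          have hdiv : m >>> (k+1) = (m >>> k) / 2 := Nat.shiftRight_succ m k
          rw [hdiv, pow_succ]
          have : m >>> k = 2 * ((m >>> k) / 2) := by omega
          calc (m >>> k) * 2^k = (2 * ((m >>> k) / 2)) * 2^k := by rw [← this]
          _ = (m >>> k) / 2 * (2^k * 2) := by ring
        rw [heq, hshift2, ih]
        simp

theorem trace_corr0 (fuel : Nat) (m : Nat) :
    pvTraceA fuel ((m:Nat):Int) 1 = pvTraceB fuel (m:Int) 0 := by
  have := trace_corr fuel m 0
  simpa using this

-- A's and B's builds produce the same dict
theorem dict_eq (nums : List Int) (h : ∀ x ∈ nums, 0 ≤ x) :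
    (PySem.List.enumerate nums 0).foldl
      (fun d p => pvBitLoopA (p.2.toNat + 1) p.2 1 p.1 d) PySem.Dict.empty
    = (PySem.List.enumerate nums 0).foldl
      (fun d p => pvBitLoopB (p.2.toNat + 1) p.2 0 p.1 d) PySem.Dict.empty := by
  apply PySem.List.foldl_congr_mem
  intro d p hp
  have hmem : p.2 ∈ nums := by
    rcases (PySem.List.mem_enumerate_iff _ _ _).mp hp with ⟨k, hk, rfl⟩
    simp
  have h0 : 0 ≤ p.2 := h _ hmem
  have hcast : p.2 = ((p.2.toNat : Nat) : Int) := by omega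
  rw [loopA_eq_fold, loopB_eq_fold]
  congr 1
  calc pvTraceA (p.2.toNat + 1) p.2 1
      = pvTraceA (p.2.toNat + 1) ((p.2.toNat : Nat) : Int) 1 := by rw [← hcast]
    _ = pvTraceB (p.2.toNat + 1) ((p.2.toNat : Nat) : Int) 0 := trace_corr0 _ _
    _ = pvTraceB (p.2.toNat + 1) p.2 0 := by rw [← hcast]

def pvInv (d : PySem.Dict Int (PySem.Set Int)) : Prop :=
  d.keys.Nodup ∧ ∀ v ∈ d.values, v.Nodup

theorem pvInv_empty : pvInv PySem.Dict.empty := by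
  constructor
  · simp [PySem.Dict.keys, PySem.Dict.empty]
  · intro v hv; simp [PySem.Dict.values, PySem.Dict.empty] at hv

theorem pvInv_touch (d : PySem.Dict Int (PySem.Set Int)) (k i : Int) (h : pvInv d) :
    pvInv (pvTouch d k i) := by
  obtain ⟨hk, hv⟩ := h
  have hgd : (d.getD k PySem.Set.empty).Nodup := by
    unfold PySem.Dict.getD
    cases hg : d.get? k with
    | none => simp [PySem.Set.empty]
    | some v =>
      simp only [Option.getD_some]
      unfold PySem.Dict.get? at hg
      cases hf : List.find? (fun p => p.1 == k) d.items with
      | none => rw [hf] at hg; simp at hg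
      | some q =>
        rw [hf] at hg
        simp at hg
        have hqmem : q ∈ d.items := List.mem_of_find?_eq_some hf
        have : q.2 ∈ d.values := List.mem_map.mpr ⟨q, hqmem, rfl⟩
        rw [← hg]
        exact hv _ this
  unfold pvTouch PySem.Dict.insert
  by_cases hc : d.contains k = true
  · rw [if_pos hc]
    constructor
    · unfold PySem.Dict.keys
      have : ((d.items.map (fun p => if (p.1 == k) = true then (k, (d.getD k PySem.Set.empty).add i) else p)).map (fun x => x.1))
          = d.items.map (fun x => x.1) := by
        rw [List.map_map]
        apply List.map_congr_left
        intro p hp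
        by_cases hpk : p.1 = k
        · simp [hpk]
        · simp [hpk]
      rw [this]; exact hk
    · intro v hv'
      unfold PySem.Dict.values at hv'
      rw [List.map_map] at hv'
      rcases List.mem_map.mp hv' with ⟨p, hp, hpe⟩
      by_cases hpk : p.1 = k
      · simp [hpk] at hpe
        rw [← hpe]
        exact PySem.Set.nodup_add _ _ hgd
      · simp [hpk] at hpe
        rw [← hpe]
        exact hv p.2 (List.mem_map.mpr ⟨p, hp, rfl⟩)
  · rw [if_neg hc]
    constructor
    · unfold PySem.Dict.keys
      rw [List.map_append]
      simp only [List.map_cons, List.map_nil]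
      apply List.Nodup.append hk (by simp)
      intro a ha hb
      simp at hb
      subst hb
      have : d.contains a = true := by
        unfold PySem.Dict.contains
        unfold PySem.Dict.keys at ha
        rcases List.mem_map.mp ha with ⟨p, hp, rfl⟩
        exact List.any_eq_true.mpr ⟨p, hp, by simp⟩
      simp [this] at hc
    · intro v hv'
      unfold PySem.Dict.values at hv'
      rw [List.map_append] at hv'
      simp only [List.map_cons, List.map_nil] at hv'
      rcases List.mem_append.mp hv' with h1 | h2
      · exact hv v h1
      · simp at h2
        subst h2
        exact PySem.Set.nodup_add _ _ hgd

theorem pvInv_foldl_touch (tr : List Int) (i : Int) (d : PySem.Dict Int (PySem.Set Int))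
    (h : pvInv d) : pvInv (tr.foldl (fun d k => pvTouch d k i) d) := by
  induction tr generalizing d with
  | nil => exact h
  | cons a tr ih => exact ih _ (pvInv_touch _ _ _ h)

theorem pvInv_build (nums : List Int) :
    pvInv ((PySem.List.enumerate nums 0).foldl
      (fun d p => pvBitLoopB (p.2.toNat + 1) p.2 0 p.1 d) PySem.Dict.empty) := by
  have : ∀ (l : List (Int × Int)) (d : PySem.Dict Int (PySem.Set Int)), pvInv d →
      pvInv (l.foldl (fun d p => pvBitLoopB (p.2.toNat + 1) p.2 0 p.1 d) d) := by
    intro l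
    induction l with
    | nil => intro d h; exact h
    | cons a l ih =>
      intro d h
      simp only [List.foldl_cons]
      apply ih
      rw [loopB_eq_fold]
      exact pvInv_foldl_touch _ _ _ h
  exact this _ _ pvInv_empty

-- lookup at the j-th key yields the j-th value (keys nodup)
theorem getD_key_getD (d : PySem.Dict Int (PySem.Set Int)) (hk : d.keys.Nodup) :
    ∀ (j : Nat), j < d.items.length →
      d.getD (d.keys.getD j 0) PySem.Set.empty = d.values.getD j PySem.Set.empty := by
  rcases d with ⟨items⟩
  induction items with
  | nil => intro j hj; simp at hj
  | cons a items ih =>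
    intro j hj
    unfold PySem.Dict.keys at hk ⊢
    simp only [List.map_cons] at hk
    cases j with
    | zero =>
      simp only [List.map_cons, List.getD_cons_zero]
      unfold PySem.Dict.getD PySem.Dict.get?
      simp [PySem.Dict.values]
    | succ j =>
      have hj' : j < items.length := by simpa using hj
      have hknd : (PySem.Dict.mk items).keys.Nodup := by
        unfold PySem.Dict.keys
        exact (List.nodup_cons.mp hk).2
      have hne : a.1 ≠ items[j].1 := by
        have : items[j].1 ∈ items.map (fun x => x.1) :=
          List.mem_map.mpr ⟨items[j], by simp, rfl⟩
        intro he
        exact (List.nodup_cons.mp hk).1 (he ▸ this)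
      have := ih hknd j hj'
      unfold PySem.Dict.getD PySem.Dict.get? at this ⊢
      simp only [List.map_cons, List.getD_cons_succ]
      rw [List.find?_cons_of_neg]
      · unfold PySem.Dict.keys at this
        simp only at this
        rw [this]
        simp [PySem.Dict.values]
      · have : (items.map (fun x => x.1)).getD j 0 = items[j].1 := by
          rw [List.getD_eq_getElem?_getD]
          simp [hj']
        simp only [this]
        simpa using hne

def pvFin (L : List (PySem.Set Int)) (t : Nat) : Finset Int := (L.getD t PySem.Set.empty).toFinset
def pvU (L : List (PySem.Set Int)) (T : Finset ℕ) : Finset Int := T.biUnion (pvFin L)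
def pvTerm (L : List (PySem.Set Int)) (n : Int) (T : Finset ℕ) : Int :=
  PySem.Int.powMod 2 (n - ((pvU L T).card : Int)).toNat pvMod
def pvG (L : List (PySem.Set Int)) (n : Int) (T : Finset ℕ) : Int :=
  (-1:ℤ)^(T.card+1) * pvTerm L n T
def pvBitset (k m : Nat) : Finset ℕ := (Finset.range k).filter (fun t => m.testBit t)

theorem pvBitset_zero (k : Nat) : pvBitset k 0 = ∅ := by
  unfold pvBitset
  apply Finset.filter_false_of_mem
  intro t _
  simp [Nat.zero_testBit]

theorem pvBitset_low (k m : Nat) (h : m < 2^k) : pvBitset (k+1) m = pvBitset k m := by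
  unfold pvBitset
  rw [Finset.range_add_one, Finset.filter_insert]
  rw [if_neg]
  simp [Nat.testBit_lt_two_pow h]

theorem pvBitset_high (k m : Nat) (h : m < 2^k) :
    pvBitset (k+1) (2^k + m) = insert k (pvBitset k m) := by
  unfold pvBitset
  rw [Finset.range_add_one, Finset.filter_insert]
  rw [if_pos]
  · congr 1
    apply Finset.filter_congr
    intro t ht
    simp only [Finset.mem_range] at ht
    simp [Nat.testBit_two_pow_add_gt ht]
  · simp [Nat.testBit_two_pow_add_eq, Nat.testBit_lt_two_pow h]

theorem sum_powerset_range_succ (G : Finset ℕ → ℤ) (k : Nat) :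
    ∑ T ∈ (Finset.range (k+1)).powerset, G T
      = (∑ T ∈ (Finset.range k).powerset, G T)
        + ∑ S ∈ (Finset.range k).powerset, G (insert k S) := by
  rw [Finset.range_add_one, Finset.powerset_insert, Finset.sum_union, Finset.sum_image]
  · intro S hS S' hS' he
    have hk : k ∉ S := fun hm => by simp at hS; exact (by simpa using hS hm)
    have hk' : k ∉ S' := fun hm => by simp at hS'; exact (by simpa using hS' hm)
    have := congrArg (fun T => T.erase k) he
    simpa [Finset.erase_insert hk, Finset.erase_insert hk'] using this
  · rw [Finset.disjoint_left]
    intro S hS hS'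
    have hk : k ∉ S := fun hm => by simp at hS; exact (by simpa using hS hm)
    rcases Finset.mem_image.mp hS' with ⟨S', _, rfl⟩
    exact hk (Finset.mem_insert_self _ _)

theorem maskSum (k : Nat) (G : Finset ℕ → ℤ) :
    ∑ m ∈ Finset.range (2^k), G (pvBitset k m) = ∑ T ∈ (Finset.range k).powerset, G T := by
  induction k generalizing G with
  | zero => simp [pvBitset]
  | succ k ih =>
    rw [pow_succ, mul_two, Finset.sum_range_add, sum_powerset_range_succ]
    congr 1
    · rw [← ih G]
      apply Finset.sum_congr rfl
      intro m hm
      rw [pvBitset_low k m (Finset.mem_range.mp hm)]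
    · rw [← ih (fun S => G (insert k S))]
      apply Finset.sum_congr rfl
      intro m hm
      rw [pvBitset_high k m (Finset.mem_range.mp hm)]

theorem gac_entries (fuel : Nat) : ∀ (l ne : Int), 1 ≤ l →
    ∀ c ∈ pvGac fuel l ne, ∀ e ∈ c, 0 ≤ e ∧ e < ne := by
  induction fuel with
  | zero => intro l ne _ c hc; simp [pvGac] at hc
  | succ fuel ih =>
    intro l ne hl c hc e he
    rw [pvGac] at hc
    by_cases hle : l ≤ ne
    · rw [if_pos hle] at hc
      by_cases h1 : l = 1
      · rw [if_pos h1] at hc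
        rcases List.mem_map.mp hc with ⟨t, ht, rfl⟩
        have := (PySem.List.mem_pyRange_one).mp ht
        simp at he
        subst he
        exact this
      · rw [if_neg h1] at hc
        rcases List.mem_append.mp hc with h | h
        · rcases List.mem_map.mp h with ⟨c', hc', rfl⟩
          rcases List.mem_append.mp he with he' | he'
          · have := ih (l-1) (ne-1) (by omega) c' hc' e he'
            omega
          · simp at he'
            subst he'
            omega
        · have := ih l (ne-1) hl c h e he
          omega
    · rw [if_neg hle] at hc
      simp at hc

theorem list_range_sum (f : ℕ → ℤ) (n : ℕ) :
    ((List.range n).map f).sum = ∑ i ∈ Finset.range n, f i := by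
  induction n with
  | zero => simp
  | succ n ih =>
    rw [List.range_succ, Finset.sum_range_succ, List.map_append, List.sum_append, ih]
    simp

theorem gac_sum (fuel : Nat) : ∀ (j ne : Nat) (h : Finset ℕ → ℤ), 1 ≤ j → ne + 1 ≤ fuel →
    ((pvGac fuel (j:Int) (ne:Int)).map (fun c => h ((c.map Int.toNat).toFinset))).sum
      = ∑ S ∈ (Finset.range ne).powersetCard j, h S := by
  induction fuel with
  | zero => intro j ne h _ hf; omega
  | succ fuel ih =>
    intro j ne h hj hf
    rw [pvGac]
    by_cases hle : (j:Int) ≤ (ne:Int)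
    · rw [if_pos hle]
      by_cases h1 : (j:Int) = 1
      · rw [if_pos h1]
        have hj1 : j = 1 := by exact_mod_cast h1
        subst hj1
        have h0 : ((ne:Int) - 0).toNat = ne := by omega
        rw [PySem.List.pyRange_one, h0, List.map_map, List.map_map]
        have hfun : (((fun c => h ((List.map Int.toNat c).toFinset)) ∘ (fun i => [i])) ∘ (fun k : ℕ => (0:Int) + (k:Int)))
            = fun t : ℕ => h {t} := by
          funext t
          simp
        rw [hfun]
        rw [Finset.powersetCard_one, Finset.sum_map, list_range_sum]
        simp
      · rw [if_neg h1]
        have hj2 : 2 ≤ j := by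
          by_contra h2
          have : j = 1 := by omega
          subst this
          simp at h1
        have hne2 : 2 ≤ ne := by
          have : (j:Int) ≤ ne := hle
          have : j ≤ ne := by exact_mod_cast this
          omega
        have e1 : (j:Int) - 1 = ((j-1 : Nat) : Int) := by omega
        have e2 : (ne:Int) - 1 = ((ne-1 : Nat) : Int) := by omega
        rw [e1, e2, List.map_append, List.sum_append, List.map_map]
        have hmap : ((fun c => h ((List.map Int.toNat c).toFinset)) ∘ fun c => c ++ [((ne-1 : Nat):Int)])
            = fun c => (fun S => h (insert (ne-1) S)) ((List.map Int.toNat c).toFinset) := by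
          funext c
          simp only [Function.comp_apply]
          congr 1
          rw [List.map_append]
          simp only [List.map_cons, List.map_nil, Int.toNat_natCast]
          rw [List.toFinset_append]
          simp only [List.toFinset_cons, List.toFinset_nil]
          ext a
          constructor
          · intro h
            simp at h ⊢
            tauto
          · intro h
            simp at h ⊢
            tauto
        rw [hmap]
        rw [ih (j-1) (ne-1) (fun S => h (insert (ne-1) S)) (by omega) (by omega)]
        rw [ih j (ne-1) h (by omega) (by omega)]
        have hrange : Finset.range ne = insert (ne-1) (Finset.range (ne-1)) := by
          conv_lhs => rw [show ne = (ne-1)+1 by omega]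
          rw [Finset.range_add_one]
        have hnotmem : (ne-1) ∉ Finset.range (ne-1) := by simp
        have hj' : j = (j-1).succ := by omega
        rw [hrange, hj', Finset.powersetCard_succ_insert hnotmem]
        rw [Finset.sum_union, Finset.sum_image]
        · simp only [Nat.succ_sub_one]; rw [add_comm]
        · intro S hS S' hS' he
          have hk : ne-1 ∉ S := fun hm => hnotmem ((Finset.mem_powersetCard.mp hS).1 hm)
          have hk' : ne-1 ∉ S' := fun hm => hnotmem ((Finset.mem_powersetCard.mp hS').1 hm)
          have := congrArg (fun T => T.erase (ne-1)) he
          simpa [Finset.erase_insert hk, Finset.erase_insert hk'] using this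
        · rw [Finset.disjoint_left]
          intro S hS hS'
          have hk : ne-1 ∉ S := fun hm => hnotmem ((Finset.mem_powersetCard.mp hS).1 hm)
          rcases Finset.mem_image.mp hS' with ⟨S', _, rfl⟩
          exact hk (Finset.mem_insert_self _ _)
    · rw [if_neg hle]
      have : ne < j := by
        have : ¬ (j ≤ ne) := fun hc => hle (by exact_mod_cast hc)
        omega
      rw [Finset.powersetCard_eq_empty.mpr (by simpa using this)]
      simp

theorem fold_union_spec (g : Int → PySem.Set Int) :
    ∀ (c : List Int) (u0 : PySem.Set Int), u0.Nodup →
      (c.foldl (fun u e => u.union (g e)) u0).Nodup ∧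
      (c.foldl (fun u e => u.union (g e)) u0).toFinset
        = u0.toFinset ∪ c.toFinset.biUnion (fun e => (g e).toFinset) := by
  intro c
  induction c with
  | nil => intro u0 h0; exact ⟨h0, by simp⟩
  | cons a c ih =>
    intro u0 h0
    simp only [List.foldl_cons]
    obtain ⟨h1, h2⟩ := ih (u0.union (g a)) (PySem.Set.nodup_union _ _ h0)
    refine ⟨h1, ?_⟩
    rw [h2]
    have : (u0.union (g a)).toFinset = u0.toFinset ∪ (g a).toFinset := by
      ext x
      simp [PySem.Set.mem_union]
    rw [this]
    ext x
    simp only [Finset.mem_union, Finset.mem_biUnion, List.toFinset_cons, Finset.mem_insert,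
      List.mem_toFinset]
    constructor
    · rintro ((h | h) | ⟨e, he, hx⟩)
      · exact Or.inl h
      · exact Or.inr ⟨a, Or.inl rfl, h⟩
      · exact Or.inr ⟨e, Or.inr (by simpa using he), hx⟩
    · rintro (h | ⟨e, (rfl | he), hx⟩)
      · exact Or.inl (Or.inl h)
      · exact Or.inl (Or.inr hx)
      · exact Or.inr ⟨e, by simpa using he, hx⟩

-- the union computed for one combination, as a pvU of the inserted index set
theorem combo_union (L : List (PySem.Set Int)) (hL : ∀ v ∈ L, v.Nodup)
    (c : List Int) (iN : Nat) :
    let g : Int → PySem.Set Int := fun e => L.getD e.toNat PySem.Set.empty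
    (c.foldl (fun u e => u.union (g e)) (L.getD iN PySem.Set.empty)).Nodup ∧
    (c.foldl (fun u e => u.union (g e)) (L.getD iN PySem.Set.empty)).toFinset
      = pvU L (insert iN ((c.map Int.toNat).toFinset)) := by
  intro g
  have hgd : ∀ (t : Nat), (L.getD t PySem.Set.empty).Nodup := by
    intro t
    rcases Nat.lt_or_ge t L.length with h | h
    · rw [List.getD_eq_getElem?_getD]
      simp only [List.getElem?_eq_getElem h, Option.getD_some]
      exact hL _ (List.getElem_mem _)
    · rw [List.getD_eq_getElem?_getD]
      simp [List.getElem?_eq_none (by omega : L.length ≤ t), PySem.Set.empty]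
  obtain ⟨h1, h2⟩ := fold_union_spec g c (L.getD iN PySem.Set.empty) (hgd iN)
  refine ⟨h1, ?_⟩
  rw [h2]
  unfold pvU pvFin
  rw [Finset.biUnion_insert]
  congr 1
  ext x
  simp only [Finset.mem_biUnion, List.mem_toFinset, List.mem_map]
  constructor
  · rintro ⟨e, he, hx⟩
    exact ⟨e.toNat, ⟨e, he, rfl⟩, hx⟩
  · rintro ⟨t, ⟨e, he, rfl⟩, hx⟩
    exact ⟨e, he, hx⟩

theorem pvMod_pos : (0:Int) < pvMod := by norm_num [pvMod]

theorem mod_is_emod (x : Int) : PySem.Int.mod x pvMod = x % pvMod :=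
  PySem.Int.mod_eq_emod_of_pos pvMod_pos

theorem powMod_nonneg (e : Nat) : 0 ≤ PySem.Int.powMod 2 e pvMod := by
  unfold PySem.Int.powMod
  exact PySem.Int.mod_nonneg _ pvMod_pos

theorem powMod_lt (e : Nat) : PySem.Int.powMod 2 e pvMod < pvMod := by
  unfold PySem.Int.powMod
  exact PySem.Int.mod_lt _ pvMod_pos

def pvIS (L : List (PySem.Set Int)) (n : Int) (i j : Nat) : Int :=
  ∑ S ∈ (Finset.range i).powersetCard j, pvTerm L n (insert i S)

def pvGA (L : List (PySem.Set Int)) (n : Int) (i : Nat) : Int :=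
  ∑ S ∈ (Finset.range i).powerset, (-1:ℤ)^S.card * pvTerm L n (insert i S)

def pvGrandA (L : List (PySem.Set Int)) (n : Int) (K : Nat) : Int :=
  ∑ i ∈ Finset.range K, pvGA L n i

def pvAInner (nums : List Int) (d : PySem.Dict Int (PySem.Set Int)) (keys : List Int)
    (i k : Int) : Int → Int → Int :=
  fun result j =>
    let unionLengths := (pvGac (i.toNat + 1) j i).foldl (fun ul c =>
      let u := c.foldl (fun u entry =>
        let entryKey := PySem.List.pyGetD keys entry 0
        u.union (d.getD entryKey PySem.Set.empty)) (d.getD k PySem.Set.empty)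
      ul ++ [PySem.Set.len u]) ([] : List Int)
    let deltas := unionLengths.map (fun u =>
      PySem.Int.powMod 2 (PySem.List.len nums - u).toNat pvMod)
    let deltaSum := PySem.Int.mod deltas.sum pvMod
    if PySem.Int.mod j 2 ≠ 0 then PySem.Int.mod (result - deltaSum) pvMod
    else PySem.Int.mod (result + deltaSum) pvMod

-- length of the union set computed for one combination = the term's exponent ingredient
theorem len_getD_values (d : PySem.Dict Int (PySem.Set Int)) (hInv : pvInv d) (t : Nat) :
    (PySem.Set.len (d.values.getD t PySem.Set.empty))
      = ((pvU d.values {t}).card : Int) := by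
  have hnd : (d.values.getD t PySem.Set.empty).Nodup := by
    rcases Nat.lt_or_ge t d.values.length with h | h
    · rw [List.getD_eq_getElem?_getD]
      simp only [List.getElem?_eq_getElem h, Option.getD_some]
      exact hInv.2 _ (List.getElem_mem _)
    · rw [List.getD_eq_getElem?_getD]
      simp [List.getElem?_eq_none (by omega : d.values.length ≤ t), PySem.Set.empty]
  rw [PySem.Set.len_eq]
  unfold pvU pvFin
  rw [Finset.singleton_biUnion]
  rw [List.toFinset_card_of_nodup hnd]

theorem pvAInner_step (nums : List Int) (d : PySem.Dict Int (PySem.Set Int)) (hInv : pvInv d)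
    (iN jN : Nat) (hj : 1 ≤ jN) (hi : iN < d.items.length) (r : Int) :
    pvAInner nums d d.keys ((iN:Nat):Int) (d.keys.getD iN 0) r ((jN:Nat):Int)
      = if jN % 2 = 1
        then (r - (pvIS d.values (PySem.List.len nums) iN jN) % pvMod) % pvMod
        else (r + (pvIS d.values (PySem.List.len nums) iN jN) % pvMod) % pvMod := by
  have hkeyslen : d.keys.length = d.items.length := by
    unfold PySem.Dict.keys; simp
  have hvalslen : d.values.length = d.items.length := by
    unfold PySem.Dict.values; simp
  unfold pvAInner
  simp only
  rw [PySem.List.foldl_append_singleton_eq_map]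
  simp only [List.nil_append, List.map_map]
  have htoNat : ((iN:Int)).toNat = iN := by omega
  rw [htoNat]
  -- rewrite each mapped element into h (setOf c)
  have hmapc : ∀ c ∈ pvGac (iN + 1) ((jN:Nat):Int) ((iN:Nat):Int),
      ((fun u => PySem.Int.powMod 2 (PySem.List.len nums - u).toNat pvMod) ∘ fun c =>
        PySem.Set.len (c.foldl (fun u entry =>
          u.union (d.getD (PySem.List.pyGetD d.keys entry 0) PySem.Set.empty))
          (d.getD (d.keys.getD iN 0) PySem.Set.empty))) c
      = (fun c => pvTerm d.values (PySem.List.len nums) (insert iN ((c.map Int.toNat).toFinset))) c := by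
    intro c hc
    have hent := gac_entries (iN + 1) ((jN:Nat):Int) ((iN:Nat):Int) (by exact_mod_cast hj) c hc
    simp only [Function.comp_apply]
    have hk0 : d.getD (d.keys.getD iN 0) PySem.Set.empty = d.values.getD iN PySem.Set.empty :=
      getD_key_getD d hInv.1 iN hi
    have hfold : c.foldl (fun u entry =>
          u.union (d.getD (PySem.List.pyGetD d.keys entry 0) PySem.Set.empty))
          (d.getD (d.keys.getD iN 0) PySem.Set.empty)
        = c.foldl (fun u e => u.union (d.values.getD e.toNat PySem.Set.empty))
          (d.values.getD iN PySem.Set.empty) := by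
      rw [hk0]
      apply PySem.List.foldl_congr_mem
      intro u e he
      have he' := hent e he
      have h1 : PySem.List.pyGetD d.keys e 0 = d.keys.getD e.toNat 0 :=
        PySem.List.pyGetD_of_nonneg _ _ he'.1
      rw [h1, getD_key_getD d hInv.1 e.toNat (by omega)]
    rw [hfold]
    obtain ⟨hnd, hfin⟩ := combo_union d.values hInv.2 c iN
    unfold pvTerm
    congr 2
    rw [PySem.Set.len_eq, ← hfin, List.toFinset_card_of_nodup hnd]
  rw [List.map_congr_left hmapc]
  rw [gac_sum (iN + 1) jN iN (fun S => pvTerm d.values (PySem.List.len nums) (insert iN S)) hj (by omega)]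
  have hpar : (PySem.Int.mod ((jN:Nat):Int) 2 ≠ 0) ↔ jN % 2 = 1 := by
    rw [show ((2:Int)) = ((2:Nat):Int) by norm_cast, PySem.Int.mod_natCast]
    constructor
    · intro h
      have : jN % 2 ≠ 0 := by exact_mod_cast h
      omega
    · intro h
      rw [h]
      norm_num
  by_cases hp : jN % 2 = 1
  · rw [if_pos (hpar.mpr hp), if_pos hp, mod_is_emod, mod_is_emod]
    rfl
  · rw [if_neg (fun hc => hp (hpar.mp hc)), if_neg hp, mod_is_emod, mod_is_emod]
    rfl

theorem pvGA_decomp (L : List (PySem.Set Int)) (n : Int) (i : Nat) :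
    pvGA L n i = pvTerm L n {i}
      + ∑ j ∈ Finset.range i, (-1:ℤ)^(j+1) * pvIS L n i (j+1) := by
  unfold pvGA
  rw [Finset.sum_powerset, Finset.card_range, Finset.sum_range_succ']
  have hsgn : ∀ j, ∑ S ∈ (Finset.range i).powersetCard j, (-1:ℤ)^S.card * pvTerm L n (insert i S)
      = (-1:ℤ)^j * pvIS L n i j := by
    intro j
    unfold pvIS
    rw [Finset.mul_sum]
    apply Finset.sum_congr rfl
    intro S hS
    rw [(Finset.mem_powersetCard.mp hS).2]
  rw [add_comm]
  congr 1
  · rw [hsgn 0]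
    simp only [pow_zero, one_mul]
    unfold pvIS
    rw [Finset.powersetCard_zero, Finset.sum_singleton]
    congr 1
  · apply Finset.sum_congr rfl
    intro j _
    rw [hsgn (j+1)]

theorem pvAInner_loop (nums : List Int) (d : PySem.Dict Int (PySem.Set Int)) (hInv : pvInv d)
    (iN : Nat) (hi : iN < d.items.length) :
    ∀ (m : Nat), m ≤ iN → ∀ (r0 : Int),
      ((PySem.List.pyRange 1 ((m:Int)+1) 1).foldl
          (pvAInner nums d d.keys ((iN:Nat):Int) (d.keys.getD iN 0)) r0) % pvMod
        = (r0 + ∑ j ∈ Finset.range m,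
            (-1:ℤ)^(j+1) * pvIS d.values (PySem.List.len nums) iN (j+1)) % pvMod
      ∧ (1 ≤ m →
          0 ≤ (PySem.List.pyRange 1 ((m:Int)+1) 1).foldl
            (pvAInner nums d d.keys ((iN:Nat):Int) (d.keys.getD iN 0)) r0
          ∧ (PySem.List.pyRange 1 ((m:Int)+1) 1).foldl
            (pvAInner nums d d.keys ((iN:Nat):Int) (d.keys.getD iN 0)) r0 < pvMod) := by
  intro m
  induction m with
  | zero =>
    intro _ r0
    rw [PySem.List.pyRange_one_eq_nil (by norm_num)]
    simp
  | succ m ih =>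
    intro hm r0
    have hsplit : PySem.List.pyRange 1 (((m+1:Nat):Int)+1) 1
        = PySem.List.pyRange 1 ((m:Int)+1) 1 ++ [(m:Int)+1] := by
      have : (((m+1:Nat):Int)+1) = ((m:Int)+1)+1 := by push_cast; ring
      rw [this]
      exact PySem.List.pyRange_one_succ_right (by omega)
    rw [hsplit, List.foldl_append]
    simp only [List.foldl_cons, List.foldl_nil]
    set rm := (PySem.List.pyRange 1 ((m:Int)+1) 1).foldl
      (pvAInner nums d d.keys ((iN:Nat):Int) (d.keys.getD iN 0)) r0 with hrm
    obtain ⟨ihm, _⟩ := ih (by omega) r0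
    have hcast : ((m:Int)+1) = (((m+1:Nat)):Int) := by push_cast; ring
    rw [hcast, pvAInner_step nums d hInv iN (m+1) (by omega) hi rm]
    set IS := pvIS d.values (PySem.List.len nums) iN (m+1) with hIS
    have hsum : (∑ j ∈ Finset.range (m+1),
        (-1:ℤ)^(j+1) * pvIS d.values (PySem.List.len nums) iN (j+1))
        = (∑ j ∈ Finset.range m,
            (-1:ℤ)^(j+1) * pvIS d.values (PySem.List.len nums) iN (j+1))
          + (-1:ℤ)^(m+1) * IS := Finset.sum_range_succ _ _
    constructor
    · by_cases hp : (m+1) % 2 = 1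
      · rw [if_pos hp]
        have hsgn : (-1:ℤ)^(m+1) = -1 := Odd.neg_one_pow (Nat.odd_iff.mpr hp)
        rw [Int.emod_emod_of_dvd _ dvd_rfl]
        rw [Int.sub_emod, Int.emod_emod_of_dvd _ dvd_rfl, ← Int.sub_emod]
        rw [Int.sub_emod, ihm, ← Int.sub_emod]
        rw [hsum, hsgn]
        ring_nf
      · rw [if_neg hp]
        have hsgn : (-1:ℤ)^(m+1) = 1 := Even.neg_one_pow (Nat.even_iff.mpr (by omega))
        rw [Int.emod_emod_of_dvd _ dvd_rfl]
        rw [Int.add_emod, Int.emod_emod_of_dvd _ dvd_rfl, ← Int.add_emod]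
        rw [Int.add_emod, ihm, ← Int.add_emod]
        rw [hsum, hsgn]
        ring_nf
    · intro _
      split <;>
        exact ⟨Int.emod_nonneg _ (ne_of_gt pvMod_pos), Int.emod_lt_of_pos _ pvMod_pos⟩

def pvABody (nums : List Int) (d : PySem.Dict Int (PySem.Set Int)) : Int → Int × Int → Int :=
  fun result p =>
    (PySem.List.pyRange 1 (p.1+1) 1).foldl (pvAInner nums d d.keys p.1 p.2)
      (result + PySem.Int.powMod 2
        (PySem.List.len nums - (d.getD p.2 PySem.Set.empty).len).toNat pvMod)

theorem countEffective_eq_fold (nums : List Int) :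
    countEffective nums =
      (let d := (PySem.List.enumerate nums 0).foldl
          (fun d p => pvBitLoopA (p.2.toNat + 1) p.2 1 p.1 d) PySem.Dict.empty
       (PySem.List.enumerate d.keys 0).foldl (pvABody nums d) 0) := rfl

theorem pvAOuter (nums : List Int) (d : PySem.Dict Int (PySem.Set Int)) (hInv : pvInv d) :
    ∀ (m : Nat), m ≤ d.items.length →
      ((PySem.List.pyRange 0 (m:Int) 1).foldl
          (fun result j => pvABody nums d result (j, PySem.List.pyGetD d.keys j 0)) 0) % pvMod
        = pvGrandA d.values (PySem.List.len nums) m % pvMod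
      ∧ ((PySem.List.pyRange 0 (m:Int) 1).foldl
          (fun result j => pvABody nums d result (j, PySem.List.pyGetD d.keys j 0)) 0
          = 0 → True)
      ∧ (0 ≤ (PySem.List.pyRange 0 (m:Int) 1).foldl
            (fun result j => pvABody nums d result (j, PySem.List.pyGetD d.keys j 0)) 0
         ∧ (PySem.List.pyRange 0 (m:Int) 1).foldl
            (fun result j => pvABody nums d result (j, PySem.List.pyGetD d.keys j 0)) 0 < pvMod) := by
  intro m
  induction m with
  | zero =>
    intro _
    rw [PySem.List.pyRange_one_eq_nil (by norm_num)]
    refine ⟨by simp [pvGrandA], fun _ => trivial, by constructor <;> norm_num [pvMod]⟩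
  | succ m ih =>
    intro hm
    obtain ⟨ihm, -, -⟩ := ih (by omega)
    have hsplit : PySem.List.pyRange 0 ((m+1:Nat):Int) 1
        = PySem.List.pyRange 0 (m:Int) 1 ++ [(m:Int)] := by
      have : ((m+1:Nat):Int) = (m:Int)+1 := by push_cast; ring
      rw [this]
      exact PySem.List.pyRange_one_succ_right (by omega)
    rw [hsplit, List.foldl_append]
    simp only [List.foldl_cons, List.foldl_nil]
    set rm := (PySem.List.pyRange 0 (m:Int) 1).foldl
      (fun result j => pvABody nums d result (j, PySem.List.pyGetD d.keys j 0)) 0 with hrm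
    have hkey : PySem.List.pyGetD d.keys (m:Int) 0 = d.keys.getD m 0 := by
      rw [PySem.List.pyGetD_of_nonneg _ _ (by omega : (0:Int) ≤ (m:Int))]
      simp
    have hterm : PySem.Int.powMod 2
        (PySem.List.len nums - (d.getD (d.keys.getD m 0) PySem.Set.empty).len).toNat pvMod
        = pvTerm d.values (PySem.List.len nums) {m} := by
      unfold pvTerm
      congr 2
      rw [getD_key_getD d hInv.1 m (by omega), len_getD_values d hInv m]
    have hbody : pvABody nums d rm ((m:Int), PySem.List.pyGetD d.keys (m:Int) 0)
        = (PySem.List.pyRange 1 ((m:Int)+1) 1).foldl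
            (pvAInner nums d d.keys ((m:Nat):Int) (d.keys.getD m 0))
            (rm + pvTerm d.values (PySem.List.len nums) {m}) := by
      unfold pvABody
      rw [hkey, hterm]
    rw [hbody]
    obtain ⟨hl1, hl2⟩ := pvAInner_loop nums d hInv m (by omega) m (le_refl m)
      (rm + pvTerm d.values (PySem.List.len nums) {m})
    constructor
    · rw [hl1]
      have hGAs : pvGrandA d.values (PySem.List.len nums) (m+1)
          = pvGrandA d.values (PySem.List.len nums) m
            + pvGA d.values (PySem.List.len nums) m := Finset.sum_range_succ _ _
      rw [hGAs, pvGA_decomp]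
      have hassoc : rm + pvTerm d.values (PySem.List.len nums) {m}
          + (∑ j ∈ Finset.range m, (-1:ℤ)^(j+1) * pvIS d.values (PySem.List.len nums) m (j+1))
          = rm + (pvTerm d.values (PySem.List.len nums) {m}
            + ∑ j ∈ Finset.range m, (-1:ℤ)^(j+1) * pvIS d.values (PySem.List.len nums) m (j+1)) := by
        ring
      rw [hassoc]
      exact Int.ModEq.add_right _ ihm
    · refine ⟨fun _ => trivial, ?_⟩
      rcases Nat.eq_zero_or_pos m with hm0 | hm1
      · subst hm0
        rw [PySem.List.pyRange_one_eq_nil (by norm_num)]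
        simp only [List.foldl_nil]
        have hrm0 : rm = 0 := by
          rw [hrm, PySem.List.pyRange_one_eq_nil (by norm_num)]
          rfl
        rw [hrm0, zero_add]
        exact ⟨powMod_nonneg _, powMod_lt _⟩
      · exact hl2 hm1

def pvBuild (nums : List Int) : PySem.Dict Int (PySem.Set Int) :=
  (PySem.List.enumerate nums 0).foldl
    (fun d p => pvBitLoopB (p.2.toNat + 1) p.2 0 p.1 d) PySem.Dict.empty

theorem A_closed (nums : List Int) (hpre : ∀ x ∈ nums, 0 ≤ x) :
    countEffective nums
      = pvGrandA ((pvBuild nums).values) (PySem.List.len nums)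
          ((pvBuild nums).items.length) % pvMod := by
  rw [countEffective_eq_fold]
  simp only
  rw [dict_eq nums hpre]
  rw [show ((PySem.List.enumerate nums 0).foldl
      (fun d p => pvBitLoopB (p.2.toNat + 1) p.2 0 p.1 d) PySem.Dict.empty) = pvBuild nums from rfl]
  set d := pvBuild nums with hd
  have hInv : pvInv d := pvInv_build nums
  have hkeyslen : d.keys.length = d.items.length := by
    unfold PySem.Dict.keys; simp
  rw [PySem.List.enumerate_eq_map_pyRange d.keys (0:Int), List.foldl_map]
  have hlen : PySem.List.len d.keys = ((d.items.length : Nat) : Int) := by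
    rw [PySem.List.len_eq, hkeyslen]
  rw [hlen]
  obtain ⟨h1, -, h3⟩ := pvAOuter nums d hInv d.items.length (le_refl _)
  rw [← h1]
  exact (Int.emod_eq_of_lt h3.1 h3.2).symm

theorem toFinset_union (u v : PySem.Set Int) :
    (u.union v).toFinset = u.toFinset ∪ v.toFinset := by
  ext x
  simp [PySem.Set.mem_union]

def pvBBody (nums : List Int) (d : PySem.Dict Int (PySem.Set Int)) : Int → Int → Int :=
  fun total m =>
    let uc := (PySem.List.pyRange 0 (PySem.List.len d.values) 1).foldl
      (fun (uc : PySem.Set Int × Int) t =>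
        if PySem.Int.band (@HShiftRight.hShiftRight Int Nat Int _ m t.toNat) 1 ≠ 0 then
          ((uc.1).union (PySem.List.pyGetD d.values t PySem.Set.empty), uc.2 + 1)
        else uc) (PySem.Set.empty, 0)
    let p := PySem.Int.powMod 2 (PySem.List.len nums - (uc.1).len).toNat pvMod
    PySem.Int.mod (if PySem.Int.mod uc.2 2 ≠ 0 then total + p else total - p) pvMod

theorem countEffective_alt_eq_fold (nums : List Int) :
    countEffective_alt nums =
      (PySem.List.pyRange 1 ((1:Int) <<< (PySem.List.len (pvBuild nums).values).toNat) 1).foldl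
        (pvBBody nums (pvBuild nums)) 0 := rfl

theorem testbit_band (mN kp : Nat) :
    (PySem.Int.band (@HShiftRight.hShiftRight Int Nat Int _ ((mN:Nat):Int) kp) 1 ≠ 0)
      ↔ mN.testBit kp = true := by
  rw [show (@HShiftRight.hShiftRight Int Nat Int _ ((mN:Nat):Int) kp)
      = ((mN >>> kp : Nat):Int) from intCast_shiftRight mN kp]
  rw [show ((1:Int)) = ((1:Nat):Int) by norm_cast, PySem.Int.band_natCast]
  rw [Nat.and_one_is_mod]
  rw [Nat.testBit_eq_decide_div_mod_eq]
  rw [Nat.shiftRight_eq_div_pow]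
  constructor
  · intro h
    have : mN / 2^kp % 2 ≠ 0 := by exact_mod_cast h
    simp
    omega
  · intro h
    simp at h
    rw [h]
    norm_num

theorem pvBInner (d : PySem.Dict Int (PySem.Set Int))
    (mN : Nat) : ∀ (kp : Nat),
    let F := (PySem.List.pyRange 0 (kp:Int) 1).foldl
      (fun (uc : PySem.Set Int × Int) t =>
        if PySem.Int.band (@HShiftRight.hShiftRight Int Nat Int _ ((mN:Nat):Int) t.toNat) 1 ≠ 0 then
          ((uc.1).union (PySem.List.pyGetD d.values t PySem.Set.empty), uc.2 + 1)
        else uc) (PySem.Set.empty, 0)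
    F.1.Nodup ∧ F.1.toFinset = pvU d.values (pvBitset kp mN)
      ∧ F.2 = ((pvBitset kp mN).card : Int) := by
  intro kp
  induction kp with
  | zero =>
    rw [PySem.List.pyRange_one_eq_nil (by norm_num)]
    refine ⟨by simp [PySem.Set.empty], ?_, ?_⟩
    · simp [PySem.Set.empty, pvBitset, pvU]
    · simp [pvBitset]
  | succ kp ih =>
    have hsplit : PySem.List.pyRange 0 ((kp+1:Nat):Int) 1
        = PySem.List.pyRange 0 (kp:Int) 1 ++ [(kp:Int)] := by
      rw [show ((kp+1:Nat):Int) = (kp:Int)+1 by push_cast; ring]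
      exact PySem.List.pyRange_one_succ_right (by omega)
    simp only at ih ⊢
    rw [hsplit, List.foldl_append]
    simp only [List.foldl_cons, List.foldl_nil, Int.toNat_natCast]
    obtain ⟨ih1, ih2, ih3⟩ := ih
    have hkpnot : kp ∉ pvBitset kp mN := by
      unfold pvBitset
      intro hm
      exact absurd (Finset.mem_of_mem_filter _ hm) (by simp)
    have hfilter : pvBitset (kp+1) mN
        = if mN.testBit kp then insert kp (pvBitset kp mN) else pvBitset kp mN := by
      unfold pvBitset
      rw [Finset.range_add_one, Finset.filter_insert]
    by_cases hb : mN.testBit kp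
    · rw [if_pos ((testbit_band mN kp).mpr (by simpa using hb))]
      have hgetD : PySem.List.pyGetD d.values (kp:Int) PySem.Set.empty
          = d.values.getD kp PySem.Set.empty := by
        rw [PySem.List.pyGetD_of_nonneg _ _ (by omega : (0:Int) ≤ (kp:Int))]
        simp
      refine ⟨PySem.Set.nodup_union _ _ ih1, ?_, ?_⟩
      · rw [toFinset_union, ih2, hfilter, if_pos hb, hgetD]
        unfold pvU
        rw [Finset.biUnion_insert]
        rw [Finset.union_comm]
        rfl
      · simp only [ih3]
        rw [hfilter, if_pos hb, Finset.card_insert_of_notMem hkpnot]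
        push_cast
        ring
    · rw [if_neg (fun hc => hb (by simpa using (testbit_band mN kp).mp hc))]
      rw [hfilter, if_neg hb]
      exact ⟨ih1, ih2, ih3⟩

def pvGrandB (L : List (PySem.Set Int)) (n : Int) (K N : Nat) : Int :=
  ∑ m ∈ Finset.Ico 1 N, (-1:ℤ)^((pvBitset K m).card+1) * pvTerm L n (pvBitset K m)

theorem pvBOuter (nums : List Int) (d : PySem.Dict Int (PySem.Set Int)) :
    ∀ (N : Nat),
      ((PySem.List.pyRange 1 (N:Int) 1).foldl (pvBBody nums d) 0) % pvMod
        = pvGrandB d.values (PySem.List.len nums) d.values.length N % pvMod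
      ∧ 0 ≤ (PySem.List.pyRange 1 (N:Int) 1).foldl (pvBBody nums d) 0
      ∧ (PySem.List.pyRange 1 (N:Int) 1).foldl (pvBBody nums d) 0 < pvMod := by
  intro N
  induction N with
  | zero =>
    rw [PySem.List.pyRange_one_eq_nil (by norm_num)]
    refine ⟨by simp [pvGrandB], by norm_num, by norm_num [pvMod]⟩
  | succ N ih =>
    rcases Nat.eq_zero_or_pos N with hN0 | hN1
    · subst hN0
      rw [PySem.List.pyRange_one_eq_nil (by norm_num)]
      refine ⟨by simp [pvGrandB], by norm_num, by norm_num [pvMod]⟩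
    · obtain ⟨ih1, -, -⟩ := ih
      have hsplit : PySem.List.pyRange 1 ((N+1:Nat):Int) 1
          = PySem.List.pyRange 1 (N:Int) 1 ++ [(N:Int)] := by
        rw [show ((N+1:Nat):Int) = (N:Int)+1 by push_cast; ring]
        exact PySem.List.pyRange_one_succ_right (by exact_mod_cast hN1)
      rw [hsplit, List.foldl_append]
      simp only [List.foldl_cons, List.foldl_nil]
      set r := (PySem.List.pyRange 1 (N:Int) 1).foldl (pvBBody nums d) 0 with hr
      obtain ⟨hu1, hu2, hu3⟩ := pvBInner d N d.values.length
      have hlen : PySem.List.len d.values = ((d.values.length : Nat) : Int) :=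
        PySem.List.len_eq _
      have hbody : pvBBody nums d r ((N:Nat):Int)
          = PySem.Int.mod
              (if PySem.Int.mod (((pvBitset d.values.length N).card : Nat) : Int) 2 ≠ 0
               then r + pvTerm d.values (PySem.List.len nums) (pvBitset d.values.length N)
               else r - pvTerm d.values (PySem.List.len nums) (pvBitset d.values.length N))
              pvMod := by
        unfold pvBBody
        simp only [hlen]
        rw [hu3]
        congr 2
        · unfold pvTerm
          congr 2
          rw [PySem.Set.len_eq, ← hu2, List.toFinset_card_of_nodup hu1]
        · unfold pvTerm
          congr 2
          rw [PySem.Set.len_eq, ← hu2, List.toFinset_card_of_nodup hu1]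
      rw [hbody]
      set T := pvBitset d.values.length N with hT
      set tm := pvTerm d.values (PySem.List.len nums) T with htm
      have hsum : pvGrandB d.values (PySem.List.len nums) d.values.length (N+1)
          = pvGrandB d.values (PySem.List.len nums) d.values.length N
            + (-1:ℤ)^(T.card+1) * tm := by
        unfold pvGrandB
        exact Finset.sum_Ico_succ_top hN1 _
      have hpar : (PySem.Int.mod ((T.card : Nat) : Int) 2 ≠ 0) ↔ T.card % 2 = 1 := by
        rw [show ((2:Int)) = ((2:Nat):Int) by norm_cast, PySem.Int.mod_natCast]
        constructor
        · intro h
          have : T.card % 2 ≠ 0 := by exact_mod_cast h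
          omega
        · intro h
          rw [h]
          norm_num
      refine ⟨?_, by rw [mod_is_emod]; exact Int.emod_nonneg _ (ne_of_gt pvMod_pos),
        by rw [mod_is_emod]; exact Int.emod_lt_of_pos _ pvMod_pos⟩
      rw [mod_is_emod, Int.emod_emod_of_dvd _ dvd_rfl, hsum]
      by_cases hp : T.card % 2 = 1
      · rw [if_pos (hpar.mpr hp)]
        have hsgn : (-1:ℤ)^(T.card+1) = 1 := Even.neg_one_pow (Nat.even_iff.mpr (by omega))
        rw [hsgn, one_mul]
        calc (r + tm) % pvMod = (r % pvMod + tm % pvMod) % pvMod := by rw [← Int.add_emod]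
          _ = _ := by
            rw [ih1, ← Int.add_emod]
      · rw [if_neg (fun hc => hp (hpar.mp hc))]
        have hsgn : (-1:ℤ)^(T.card+1) = -1 := Odd.neg_one_pow (Nat.odd_iff.mpr (by omega))
        rw [hsgn]
        calc (r - tm) % pvMod = (r % pvMod - tm % pvMod) % pvMod := by rw [← Int.sub_emod]
          _ = _ := by
            rw [ih1, ← Int.sub_emod]
            ring_nf

theorem B_closed (nums : List Int) :
    countEffective_alt nums
      = pvGrandB ((pvBuild nums).values) (PySem.List.len nums)
          ((pvBuild nums).values.length) (2^((pvBuild nums).values.length)) % pvMod := by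
  rw [countEffective_alt_eq_fold]
  set d := pvBuild nums with hd
  have hsh : (1:Int) <<< (PySem.List.len d.values).toNat = ((2^(d.values.length) : Nat) : Int) := by
    rw [PySem.List.len_eq]
    rw [show ((d.values.length : Nat) : Int).toNat = d.values.length by omega]
    exact one_shiftLeft_int _
  rw [hsh]
  obtain ⟨h1, h2, h3⟩ := pvBOuter nums d (2^(d.values.length))
  rw [← h1]
  exact (Int.emod_eq_of_lt h2 h3).symm

theorem pvGA_as_G (L : List (PySem.Set Int)) (n : Int) (i : Nat) :
    pvGA L n i = ∑ S ∈ (Finset.range i).powerset, pvG L n (insert i S) := by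
  unfold pvGA pvG
  apply Finset.sum_congr rfl
  intro S hS
  have hiS : i ∉ S := by
    intro hm
    have := Finset.mem_powerset.mp hS hm
    simp at this
  rw [Finset.card_insert_of_notMem hiS]
  have : (-1:ℤ)^(S.card+1+1) = (-1:ℤ)^S.card := by
    rw [pow_succ, pow_succ]
    ring
  rw [this]

theorem grandA_total (L : List (PySem.Set Int)) (n : Int) (K : Nat) :
    pvGrandA L n K = (∑ T ∈ (Finset.range K).powerset, pvG L n T) - pvG L n ∅ := by
  induction K with
  | zero =>
    unfold pvGrandA
    simp
  | succ K ih =>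
    have h1 : pvGrandA L n (K+1) = pvGrandA L n K + pvGA L n K := Finset.sum_range_succ _ _
    rw [h1, ih, pvGA_as_G, sum_powerset_range_succ (pvG L n) K]
    ring

theorem grandB_total (L : List (PySem.Set Int)) (n : Int) (K : Nat) :
    pvGrandB L n K (2^K) = (∑ T ∈ (Finset.range K).powerset, pvG L n T) - pvG L n ∅ := by
  have hpos : 0 < 2^K := Nat.two_pow_pos K
  have h0 : ∑ m ∈ Finset.range (2^K), pvG L n (pvBitset K m)
      = pvG L n (pvBitset K 0) + ∑ m ∈ Finset.Ico 1 (2^K), pvG L n (pvBitset K m) := by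
    rw [Finset.range_eq_Ico, Finset.sum_eq_sum_Ico_succ_bot hpos]
  have h1 : pvGrandB L n K (2^K) = ∑ m ∈ Finset.Ico 1 (2^K), pvG L n (pvBitset K m) := by
    unfold pvGrandB pvG
    rfl
  have h2 : pvG L n ∅ + ∑ m ∈ Finset.Ico 1 (2^K), pvG L n (pvBitset K m)
      = ∑ T ∈ (Finset.range K).powerset, pvG L n T := by
    rw [← maskSum K (pvG L n), h0, pvBitset_zero]
  rw [h1]
  omega

theorem grand_eq (L : List (PySem.Set Int)) (n : Int) (K : Nat) :
    pvGrandA L n K = pvGrandB L n K (2^K) := by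
  rw [grandA_total, grandB_total]

-- ===== VERDICT (by name: the statement is the Claim_ definition above) =====
theorem countEffective_spec : Claim_equal_countEffective := by
  unfold Claim_equal_countEffective
  intro nums _ hpre
  unfold Spec_countEffective
  have hvals : (pvBuild nums).values.length = (pvBuild nums).items.length := by
    unfold PySem.Dict.values
    simp
  rw [A_closed nums hpre, B_closed nums, hvals, grand_eq]
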